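-- pv_equiv track=rewrite | github.com/veepee-oss/happysql | HappySQL_Server/happy_sql/database_call.py | order_by
-- ===== SOURCE A (Python) =====
-- def order_by(params):
--     final = " ORDER BY "
--     values = params["order"].split(",")
--     for value in values:
--         elems = value.split(".")
--         for elem in elems:
--             final += elem + " "
--         final += ", "
--     final = final[:-2]
--     return final
-- ===== SOURCE B (Python) =====
-- def order_by(params):
--     return " ORDER BY " + params["order"].replace(".", " ").replace(",", " , ") + " "
-- ===== Notes on version B (the rewrite author's own statement) =====
-- stated objective: idiomatic
-- what changed: The nested split/concatenate loops plus trailing-'[:-2]' trim are replaced by two whole-string replace calls ('.'->' ', ','->' , ') wrapped in the fixed prefix and one trailing space; no splitting, no loops, no slicing.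
import Mathlib
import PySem

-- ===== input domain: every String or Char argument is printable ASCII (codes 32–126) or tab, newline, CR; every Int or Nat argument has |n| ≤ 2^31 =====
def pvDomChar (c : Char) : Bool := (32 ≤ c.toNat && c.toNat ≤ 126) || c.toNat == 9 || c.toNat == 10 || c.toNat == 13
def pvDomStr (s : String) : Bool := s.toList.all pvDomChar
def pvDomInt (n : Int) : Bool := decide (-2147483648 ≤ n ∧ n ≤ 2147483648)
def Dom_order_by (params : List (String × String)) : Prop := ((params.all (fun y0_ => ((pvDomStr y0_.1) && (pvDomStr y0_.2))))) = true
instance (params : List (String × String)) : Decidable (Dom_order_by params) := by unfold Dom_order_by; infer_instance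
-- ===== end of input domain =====

-- B replaces A's nested split/concatenate loops and '[:-2]' trim by two whole-string
-- replace calls wrapped in a fixed prefix and one trailing space (objective: idiomatic).

-- ===== PORT A =====
def order_by (params : List (String × String)) : String :=
  match PySem.Dict.get? (PySem.Dict.mk params) "order" with
  | none => ""  -- KeyError; excluded by Pre_order_by
  | some order =>
    match PySem.Str.split? order "," with
    | none => ""  -- unreachable: the separator "," is nonempty
    | some values =>
      let final := values.foldl (fun final value =>
        match PySem.Str.split? value "." with
        | none => final  -- unreachable: the separator "." is nonempty
        | some elems =>
          (elems.foldl (fun final elem => final ++ elem ++ " ") final) ++ ", ") " ORDER BY "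
      PySem.Str.slice final none (some (-2))

-- ===== PORT B =====
def order_by_alt (params : List (String × String)) : String :=
  match PySem.Dict.get? (PySem.Dict.mk params) "order" with
  | none => ""  -- KeyError; excluded by Pre_order_by
  | some order =>
    " ORDER BY " ++ PySem.Str.replace (PySem.Str.replace order "." " ") "," " , " ++ " "

-- ===== PRECONDITION & SPEC =====
-- Pre_ excludes exactly the inputs with no "order" key, on which Python A raises KeyError (B raises too).
def Pre_order_by (params : List (String × String)) : Prop :=
  PySem.Dict.contains (PySem.Dict.mk params) "order" = true
instance (params : List (String × String)) : Decidable (Pre_order_by params) := by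
  unfold Pre_order_by; infer_instance
def pvWitness_order_by : (List (String × String)) := [("order", "name.asc,id")]

def Spec_order_by (params : List (String × String)) (out : String) : Prop := out = order_by_alt params
instance (params : List (String × String)) (out : String) : Decidable (Spec_order_by params out) := by unfold Spec_order_by; infer_instance

-- ===== CLAIM (what is proved, stated in full; the proofs are below) =====
def Claim_equal_order_by : Prop := ∀ (params : List (String × String)), Dom_order_by params → Pre_order_by params → Spec_order_by params (order_by params)

-- ===== LEMMAS AND PROOFS =====

-- split on a single character, structurally
def pvSplitC (c : Char) : List Char → List (List Char)
  | [] => [[]]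
  | a :: t =>
    match pvSplitC c t with
    | [] => [[]]  -- unreachable
    | p :: ps => if a = c then [] :: p :: ps else (a :: p) :: ps

-- replace a single character by a string, structurally
def pvRepl (o : Char) (new : List Char) (l : List Char) : List Char :=
  l.flatMap (fun ch => if ch = o then new else [ch])

-- prepend x onto the head piece
def pvConsHead (x : List Char) : List (List Char) → List (List Char)
  | [] => [x]
  | p :: ps => (x ++ p) :: ps

theorem pvSplitC_ne_nil (c : Char) (l : List Char) : pvSplitC c l ≠ [] := by
  cases l with
  | nil => simp [pvSplitC]
  | cons a t =>
    rcases h : pvSplitC c t with _ | ⟨p, ps⟩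
    · simp [pvSplitC, h]
    · simp only [pvSplitC, h]
      split <;> simp

theorem pvRepl_cons (o : Char) (new : List Char) (ch : Char) (t : List Char) :
    pvRepl o new (ch :: t) = (if ch = o then new else [ch]) ++ pvRepl o new t := by
  simp only [pvRepl, List.flatMap_cons]

theorem pvSplitOn_go_char (c : Char) (fuel : Nat) :
    ∀ (l cur : List Char) (acc2 : List (List Char)), l.length ≤ fuel →
    PySem.Chars.splitOn.go [c] fuel l cur acc2.reverse
      = acc2 ++ pvConsHead cur.reverse (pvSplitC c l) := by
  induction fuel with
  | zero =>
    intro l cur acc2 h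
    cases l with
    | nil => simp [PySem.Chars.splitOn.go, pvSplitC, pvConsHead]
    | cons a t => simp at h
  | succ fuel ih =>
    intro l cur acc2 h
    cases l with
    | nil => simp [PySem.Chars.splitOn.go, pvSplitC, pvConsHead]
    | cons ch rest =>
      have hpre : List.isPrefixOf [c] (ch :: rest) = (c == ch) := by
        simp [List.isPrefixOf]
      have h' : rest.length ≤ fuel := by simp at h; omega
      rcases hsp : pvSplitC c rest with _ | ⟨p, ps⟩
      · exact absurd hsp (pvSplitC_ne_nil c rest)
      by_cases hc : c = ch
      · subst hc
        simp only [PySem.Chars.splitOn.go, hpre, beq_self_eq_true, if_true]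
        rw [show List.drop [c].length (c :: rest) = rest from by simp]
        rw [show (cur.reverse :: acc2.reverse) = (acc2 ++ [cur.reverse]).reverse from by simp]
        rw [ih rest [] (acc2 ++ [cur.reverse]) h']
        simp [pvSplitC, hsp, pvConsHead]
      · have hb : (c == ch) = false := by simp [hc]
        simp only [PySem.Chars.splitOn.go, hpre, hb, Bool.false_eq_true, if_false]
        rw [ih rest (ch :: cur) acc2 h']
        have hch : ¬ (ch = c) := fun hh => hc hh.symm
        simp [pvSplitC, hsp, pvConsHead, hch, List.append_assoc]

theorem pvSplitOn_char (l : List Char) (c : Char) :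
    PySem.Chars.splitOn l [c] = pvSplitC c l := by
  have h := pvSplitOn_go_char c (l.length + 1) l [] ([] : List (List Char)) (by omega)
  simp only [List.reverse_nil] at h
  rw [PySem.Chars.splitOn, h]
  rcases hsp : pvSplitC c l with _ | ⟨p, ps⟩
  · exact absurd hsp (pvSplitC_ne_nil c l)
  · simp [pvConsHead]

theorem pvReplace_go_char (o : Char) (new : List Char) (fuel : Nat) :
    ∀ (l acc : List Char), l.length ≤ fuel →
    PySem.Chars.replace.go [o] new fuel l acc = acc.reverse ++ pvRepl o new l := by
  induction fuel with
  | zero =>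
    intro l acc h
    cases l with
    | nil => simp [PySem.Chars.replace.go, pvRepl]
    | cons a t => simp at h
  | succ fuel ih =>
    intro l acc h
    cases l with
    | nil => simp [PySem.Chars.replace.go, pvRepl]
    | cons ch rest =>
      have hpre : List.isPrefixOf [o] (ch :: rest) = (o == ch) := by
        simp [List.isPrefixOf]
      have h' : rest.length ≤ fuel := by simp at h; omega
      by_cases hc : o = ch
      · subst hc
        simp only [PySem.Chars.replace.go, hpre, beq_self_eq_true, if_true]
        rw [show List.drop [o].length (o :: rest) = rest from by simp]
        rw [ih rest (new.reverse ++ acc) h']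
        simp [pvRepl_cons, List.append_assoc]
      · have hb : (o == ch) = false := by simp [hc]
        simp only [PySem.Chars.replace.go, hpre, hb, Bool.false_eq_true, if_false]
        rw [ih rest (ch :: acc) h']
        have hch : ¬ (ch = o) := fun hh => hc hh.symm
        simp [pvRepl_cons, hch, List.append_assoc]

theorem pvReplace_char (l : List Char) (o : Char) (new : List Char) :
    PySem.Chars.replace l [o] new = pvRepl o new l := by
  rw [PySem.Chars.replace]
  simp only [List.isEmpty_cons, Bool.false_eq_true, if_false]
  exact pvReplace_go_char o new l.length l [] (le_refl _)

-- flatMap over the '.'-pieces, each with a trailing space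
theorem pvFlat_inner (v : List Char) :
    (pvSplitC '.' v).flatMap (fun e => e ++ [' ']) = pvRepl '.' [' '] v ++ [' '] := by
  induction v with
  | nil => simp [pvSplitC, pvRepl]
  | cons ch t ih =>
    rcases hsp : pvSplitC '.' t with _ | ⟨p, ps⟩
    · exact absurd hsp (pvSplitC_ne_nil _ t)
    have hflat : (pvSplitC '.' (ch :: t)).flatMap (fun e => e ++ [' '])
        = (if ch = '.' then [' '] else [ch])
            ++ (pvSplitC '.' t).flatMap (fun e => e ++ [' ']) := by
      simp only [pvSplitC, hsp]
      by_cases hc : ch = '.'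
      · simp [hc]
      · simp [hc, List.append_assoc]
    rw [hflat, ih, pvRepl_cons]
    simp [List.append_assoc]

-- flatMap over the ','-pieces: each piece dot-replaced, one space, then ", "
theorem pvFlat_outer (l : List Char) :
    (pvSplitC ',' l).flatMap (fun v => pvRepl '.' [' '] v ++ [' '] ++ [',', ' '])
      = pvRepl ',' [' ', ',', ' '] (pvRepl '.' [' '] l) ++ [' ', ',', ' '] := by
  induction l with
  | nil => simp [pvSplitC, pvRepl]
  | cons ch t ih =>
    rcases hsp : pvSplitC ',' t with _ | ⟨p, ps⟩
    · exact absurd hsp (pvSplitC_ne_nil _ t)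
    have hflat : (pvSplitC ',' (ch :: t)).flatMap
          (fun v => pvRepl '.' [' '] v ++ [' '] ++ [',', ' '])
        = (if ch = ',' then [' ', ',', ' '] else if ch = '.' then [' '] else [ch])
            ++ (pvSplitC ',' t).flatMap (fun v => pvRepl '.' [' '] v ++ [' '] ++ [',', ' ']) := by
      simp only [pvSplitC, hsp]
      by_cases hc : ch = ','
      · have hd : ¬ (ch = '.') := by rw [hc]; decide
        simp [hc, pvRepl]
      · by_cases hd : ch = '.'
        · simp [hd, pvRepl_cons, List.append_assoc]
        · simp [hc, hd, pvRepl_cons, List.append_assoc]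
    have hstep : pvRepl ',' [' ', ',', ' '] (pvRepl '.' [' '] (ch :: t))
        = (if ch = ',' then [' ', ',', ' '] else if ch = '.' then [' '] else [ch])
            ++ pvRepl ',' [' ', ',', ' '] (pvRepl '.' [' '] t) := by
      rw [pvRepl_cons]
      by_cases hc : ch = ','
      · have hd : ¬ (ch = '.') := by rw [hc]; decide
        simp only [hc]
        simp [pvRepl]
      · by_cases hd : ch = '.'
        · have hsp2 : ¬ ((' ' : Char) = ',') := by decide
          simp only [hd]
          simp [pvRepl, hsp2]
        · simp only [hd, hc]
          simp [pvRepl, hc]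
    rw [hflat, ih, hstep]
    simp [List.append_assoc]

-- fold of a String-valued loop over of-listed pieces, moved to the char-list side
theorem pvToList_foldl_map (ps : List (List Char)) (s : String)
    (F : String → String → String) (G : List Char → List Char → List Char)
    (h : ∀ (a : String) (v : List Char), (F a (String.ofList v)).toList = G a.toList v) :
    ((ps.map String.ofList).foldl F s).toList = ps.foldl G s.toList := by
  induction ps generalizing s with
  | nil => simp
  | cons p t ih =>
    simp only [List.map_cons, List.foldl_cons]
    rw [ih (F s (String.ofList p)), h]

theorem pvSplit_dot (s : String) :
    PySem.Str.split? s "." = some ((pvSplitC '.' s.toList).map String.ofList) := by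
  have h1 : ("." : String).toList = ['.'] := by decide
  simp [PySem.Str.split?, PySem.Chars.split?, h1, pvSplitOn_char]

theorem pvSplit_comma (s : String) :
    PySem.Str.split? s "," = some ((pvSplitC ',' s.toList).map String.ofList) := by
  have h1 : ("," : String).toList = [','] := by decide
  simp [PySem.Str.split?, PySem.Chars.split?, h1, pvSplitOn_char]

-- the inner String fold computed on char lists
theorem pvInner_fold (a : String) (v : List Char) :
    (((pvSplitC '.' v).map String.ofList).foldl
        (fun final elem => final ++ elem ++ " ") a).toList
      = a.toList ++ (pvRepl '.' [' '] v ++ [' ']) := by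
  have hsp1 : (" " : String).toList = [' '] := by decide
  rw [pvToList_foldl_map (pvSplitC '.' v) a
      (fun final elem => final ++ elem ++ " ")
      (fun acc e => acc ++ (e ++ [' ']))
      (fun a v => by simp [String.toList_append, hsp1, List.append_assoc])]
  rw [PySem.List.foldl_append_eq_flatMap (fun e => e ++ [' ']) (pvSplitC '.' v) a.toList]
  rw [pvFlat_inner]

theorem pvString_eq_of_toList (a b : String) (h : a.toList = b.toList) : a = b := by
  have := congrArg String.ofList h
  simpa using this

-- ===== VERDICT (by name: the statement is the Claim_ definition above) =====
theorem order_by_spec : Claim_equal_order_by := by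
  intro params _ hpre
  unfold Spec_order_by order_by order_by_alt
  rcases hget : PySem.Dict.get? (PySem.Dict.mk params) "order" with _ | order
  · rfl
  · apply pvString_eq_of_toList
    simp only []
    rw [pvSplit_comma order]
    simp only []
    rw [PySem.Str.toList_slice]
    rw [pvToList_foldl_map (pvSplitC ',' order.toList) " ORDER BY "
        (fun final value =>
          match PySem.Str.split? value "." with
          | none => final
          | some elems =>
            (elems.foldl (fun final elem => final ++ elem ++ " ") final) ++ ", ")
        (fun a v => a ++ (pvRepl '.' [' '] v ++ [' '] ++ [',', ' ']))
        (fun a v => by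
          simp only []
          rw [pvSplit_dot (String.ofList v)]
          simp only []
          have h2 : (", " : String).toList = [',', ' '] := by decide
          rw [String.toList_append, pvInner_fold]
          have h3 : (String.ofList v).toList = v := by simp
          rw [h3, h2]
          simp [List.append_assoc])]
    rw [PySem.List.foldl_append_eq_flatMap
        (fun v => pvRepl '.' [' '] v ++ [' '] ++ [',', ' '])
        (pvSplitC ',' order.toList) (" ORDER BY " : String).toList]
    rw [pvFlat_outer]
    rw [show (" ORDER BY " : String).toList
          ++ (pvRepl ',' [' ', ',', ' '] (pvRepl '.' [' '] order.toList) ++ [' ', ',', ' '])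
        = ((" ORDER BY " : String).toList
            ++ pvRepl ',' [' ', ',', ' '] (pvRepl '.' [' '] order.toList) ++ [' '])
            ++ [',', ' '] from by simp [List.append_assoc]]
    rw [PySem.Chars.slice_eq_listSlice]
    rw [PySem.List.slice_to_neg_ofNat _ 2 (by norm_num)]
    rw [show (((" ORDER BY " : String).toList
            ++ pvRepl ',' [' ', ',', ' '] (pvRepl '.' [' '] order.toList) ++ [' '])
            ++ [',', ' ']).length - 2
        = ((" ORDER BY " : String).toList
            ++ pvRepl ',' [' ', ',', ' '] (pvRepl '.' [' '] order.toList) ++ [' ']).length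
        from by simp]
    rw [List.take_left]
    have hdot : ("." : String).toList = ['.'] := by decide
    have hcom : ("," : String).toList = [','] := by decide
    have hsp1 : (" " : String).toList = [' '] := by decide
    have hsp3 : (" , " : String).toList = [' ', ',', ' '] := by decide
    simp only [String.toList_append, PySem.Str.toList_replace, hdot, hcom, hsp1, hsp3]
    rw [pvReplace_char, pvReplace_char]
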